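-- pv_equiv track=rewrite | github.com/SVCE-ACM/A-December-Of_Algorithms-2024 | December 06/python3_BawadharaniSree_Target_Pair_Finder.py | find_target_pairs
-- ===== SOURCE A (Python) =====
-- def find_target_pairs(numbers, target):
--     unique_pairs = []
--     visited = set()
--     for i in range(len(numbers)):
--         for j in range(i + 1, len(numbers)):
--             if numbers[i] + numbers[j] == target:
--                 pair = tuple(sorted((numbers[i], numbers[j])))
--                 if pair not in visited:
--                     unique_pairs.append(pair)
--                     visited.add(pair)
--     return unique_pairs
-- ===== SOURCE B (Python) =====
-- def find_target_pairs(numbers, target):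
--     remaining = {}
--     for v in numbers:
--         remaining[v] = remaining.get(v, 0) + 1
--     unique_pairs = []
--     visited = set()
--     for v in numbers:
--         remaining[v] -= 1
--         c = target - v
--         if remaining.get(c, 0) > 0:
--             pair = (v, c) if v <= c else (c, v)
--             if pair not in visited:
--                 visited.add(pair)
--                 unique_pairs.append(pair)
--     return unique_pairs
-- ===== Notes on version B (the rewrite author's own statement) =====
-- stated objective: faster
-- what changed: Replaces A's O(n^2) nested index scan (for each i, scan all j>i) by a single pass over the list with a pre-built value->count dictionary that is decremented in place, so the inner scan for a complement disappears; output pairs and their order are identical.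
import Mathlib
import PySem

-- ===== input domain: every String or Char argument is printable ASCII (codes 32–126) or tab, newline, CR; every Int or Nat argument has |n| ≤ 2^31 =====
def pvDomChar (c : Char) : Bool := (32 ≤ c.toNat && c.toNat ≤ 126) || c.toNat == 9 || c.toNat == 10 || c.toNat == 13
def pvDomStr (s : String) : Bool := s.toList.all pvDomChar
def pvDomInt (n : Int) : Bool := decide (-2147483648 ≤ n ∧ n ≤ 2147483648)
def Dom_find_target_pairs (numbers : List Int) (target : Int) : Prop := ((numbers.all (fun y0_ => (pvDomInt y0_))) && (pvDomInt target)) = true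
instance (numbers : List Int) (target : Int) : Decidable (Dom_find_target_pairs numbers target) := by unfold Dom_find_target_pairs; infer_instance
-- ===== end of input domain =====

-- B replaces A's O(n^2) nested index scan by a single pass over a pre-built
-- occurrence counter (same output, same order); proved equal on all inputs.

-- ===== PORT A =====
def find_target_pairs (numbers : List Int) (target : Int) : List (List Int) :=
  ((PySem.List.pyRange 0 (PySem.List.len numbers) 1).foldl
    (fun (st : List (List Int) × PySem.Set (List Int)) i =>
      (PySem.List.pyRange (i + 1) (PySem.List.len numbers) 1).foldl
        (fun st j =>
          let x := PySem.List.pyGetD numbers i 0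
          let y := PySem.List.pyGetD numbers j 0
          if x + y = target then
            -- tuple(sorted((numbers[i], numbers[j]))) on a 2-tuple
            let pair := if x ≤ y then [x, y] else [y, x]
            if st.2.contains pair then st
            else (st.1 ++ [pair], PySem.Set.add st.2 pair)
          else st)
        st)
    ([], PySem.Set.empty)).1

-- ===== PORT B =====
def find_target_pairs_alt (numbers : List Int) (target : Int) : List (List Int) :=
  let remaining := numbers.foldl
    (fun (d : PySem.Dict Int Int) v => d.insert v (d.getD v 0 + 1)) PySem.Dict.empty
  (numbers.foldl
    (fun (st : PySem.Dict Int Int × List (List Int) × PySem.Set (List Int)) v =>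
      let rem := st.1.insert v (st.1.getD v 0 - 1)
      let c := target - v
      if rem.getD c 0 > 0 then
        let pair := if v ≤ c then [v, c] else [c, v]
        if st.2.2.contains pair then (rem, st.2.1, st.2.2)
        else (rem, st.2.1 ++ [pair], PySem.Set.add st.2.2 pair)
      else (rem, st.2.1, st.2.2))
    (remaining, [], PySem.Set.empty)).2.1

-- ===== PRECONDITION & SPEC =====
def Spec_find_target_pairs (numbers : List Int) (target : Int) (out : List (List Int)) : Prop := out = find_target_pairs_alt numbers target
instance (numbers : List Int) (target : Int) (out : List (List Int)) : Decidable (Spec_find_target_pairs numbers target out) := by unfold Spec_find_target_pairs; infer_instance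

-- ===== CLAIM (what is proved, stated in full; the proofs are below) =====
def Claim_equal_find_target_pairs : Prop := ∀ (numbers : List Int) (target : Int), Dom_find_target_pairs numbers target → Spec_find_target_pairs numbers target (find_target_pairs numbers target)

-- ===== LEMMAS AND PROOFS =====

-- append `p` unless already visited
def pvPush (st : List (List Int) × PySem.Set (List Int)) (p : List Int) :
    List (List Int) × PySem.Set (List Int) :=
  if st.2.contains p then st else (st.1 ++ [p], PySem.Set.add st.2 p)

-- one outer step, phrased on the element `v` and the list `rest` after it
def pvStep (target : Int) (st : List (List Int) × PySem.Set (List Int)) (v : Int)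
    (rest : List Int) : List (List Int) × PySem.Set (List Int) :=
  if (target - v) ∈ rest then
    pvPush st (if v ≤ target - v then [v, target - v] else [target - v, v])
  else st

-- common functional specification of both programs
def pvSpecFold (target : Int) : List Int → (List (List Int) × PySem.Set (List Int)) →
    List (List Int) × PySem.Set (List Int)
  | [], st => st
  | v :: rest, st => pvSpecFold target rest (pvStep target st v rest)

-- A = pvSpecFold: the inner j-loop hits only the value target-v, so each outer step
-- appends at most one pair; B = pvSpecFold: the decremented counter counts the suffix.
lemma pvPush_idem (st : List (List Int) × PySem.Set (List Int)) (p : List Int) :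
    pvPush (pvPush st p) p = pvPush st p := by
  unfold pvPush
  by_cases h : p ∈ st.2 <;> simp [h, PySem.Set.add]
lemma pvInnerA (target v : Int) : ∀ (rest : List Int) (st : List (List Int) × PySem.Set (List Int)),
    rest.foldl (fun st y =>
        if v + y = target then
          let pair := if v ≤ y then [v, y] else [y, v]
          if st.2.contains pair then st else (st.1 ++ [pair], PySem.Set.add st.2 pair)
        else st) st
      = pvStep target st v rest := by
  intro rest
  induction rest with
  | nil => intro st; simp [pvStep]
  | cons y rest ih =>
    intro st
    by_cases h : v + y = target
    · have hy : y = target - v := by omega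
      subst hy
      rw [List.foldl_cons]
      have hb : (if v + (target - v) = target then
            let pair := if v ≤ target - v then [v, target - v] else [target - v, v]
            if st.2.contains pair then st else (st.1 ++ [pair], PySem.Set.add st.2 pair)
          else st) = pvPush st (if v ≤ target - v then [v, target - v] else [target - v, v]) := by
        simp only [pvPush, h, if_pos]
      rw [hb, ih]
      simp [pvStep, pvPush_idem]
    · have hy : target - v ≠ y := by omega
      rw [List.foldl_cons]
      simp only [h, if_false]
      rw [ih]
      simp [pvStep, hy]

lemma pvOuterA (target : Int) : ∀ (xs pre : List Int) (st : List (List Int) × PySem.Set (List Int)),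
    (PySem.List.pyRange (pre.length : Int) (((pre ++ xs).length : Int)) 1).foldl
      (fun st i =>
        (PySem.List.pyRange (i + 1) (PySem.List.len (pre ++ xs)) 1).foldl
          (fun st j =>
            let x := PySem.List.pyGetD (pre ++ xs) i 0
            let y := PySem.List.pyGetD (pre ++ xs) j 0
            if x + y = target then
              let pair := if x ≤ y then [x, y] else [y, x]
              if st.2.contains pair then st
              else (st.1 ++ [pair], PySem.Set.add st.2 pair)
            else st)
          st)
      st
    = pvSpecFold target xs st := by
  intro xs
  induction xs with
  | nil => intro pre st; rw [PySem.List.pyRange_one_eq_nil (by simp)]; rfl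
  | cons v xs ih =>
    intro pre st
    have hlt : (pre.length : Int) < (((pre ++ v :: xs).length : Int)) := by
      simp
    rw [PySem.List.pyRange_one_cons hlt, List.foldl_cons]
    have hx : PySem.List.pyGetD (pre ++ v :: xs) ((pre.length : Int)) 0 = v := by
      simp
    have hstep : (PySem.List.pyRange ((pre.length : Int) + 1) (PySem.List.len (pre ++ v :: xs)) 1).foldl
          (fun st j =>
            let x := PySem.List.pyGetD (pre ++ v :: xs) (pre.length : Int) 0
            let y := PySem.List.pyGetD (pre ++ v :: xs) j 0
            if x + y = target then
              let pair := if x ≤ y then [x, y] else [y, x]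
              if st.2.contains pair then st
              else (st.1 ++ [pair], PySem.Set.add st.2 pair)
            else st) st = pvStep target st v xs := by
      simp only [hx]
      rw [PySem.List.foldl_pyRange_pyGetD (pre ++ v :: xs) 0
        (fun st y =>
          if v + y = target then
            let pair := if v ≤ y then [v, y] else [y, v]
            if st.2.contains pair then st else (st.1 ++ [pair], PySem.Set.add st.2 pair)
          else st) st (by omega)]
      have hdrop : ((pre.length : Int) + 1).toNat = pre.length + 1 := by omega
      rw [hdrop]
      have : (pre ++ v :: xs).drop (pre.length + 1) = xs := by
        have : pre ++ v :: xs = (pre ++ [v]) ++ xs := by simp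
        rw [this]
        have hl : pre.length + 1 = (pre ++ [v]).length := by simp
        rw [hl, List.drop_left]
      rw [this, pvInnerA]
    rw [hstep]
    have hre : pre ++ v :: xs = (pre ++ [v]) ++ xs := by simp
    have hlen : (pre.length : Int) + 1 = ((pre ++ [v]).length : Int) := by simp
    rw [hre, hlen]  -- ??
    rw [ih (pre ++ [v]) (pvStep target st v xs)]
    rfl

lemma pvMainB (target : Int) : ∀ (xs : List Int) (d : PySem.Dict Int Int)
    (st : List (List Int) × PySem.Set (List Int)),
    (∀ x, d.getD x 0 = (xs.count x : Int)) →
    (xs.foldl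
      (fun (st : PySem.Dict Int Int × List (List Int) × PySem.Set (List Int)) v =>
        let rem := st.1.insert v (st.1.getD v 0 - 1)
        let c := target - v
        if rem.getD c 0 > 0 then
          let pair := if v ≤ c then [v, c] else [c, v]
          if st.2.2.contains pair then (rem, st.2.1, st.2.2)
          else (rem, st.2.1 ++ [pair], PySem.Set.add st.2.2 pair)
        else (rem, st.2.1, st.2.2))
      (d, st.1, st.2)).2
    = pvSpecFold target xs st := by
  intro xs
  induction xs with
  | nil => intro d st h; rfl
  | cons v xs ih =>
    intro d st h
    rw [List.foldl_cons]
    have hrem : ∀ x, (d.insert v (d.getD v 0 - 1)).getD x 0 = (xs.count x : Int) := by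
      intro x
      rw [PySem.Dict.getD_insert]
      by_cases hx : x = v
      · rw [if_pos hx, hx, h, List.count_cons_self]
        push_cast; omega
      · rw [if_neg hx, h x, List.count_cons_of_ne (by exact fun e => hx e.symm)]
    have hcond : ((d.insert v (d.getD v 0 - 1)).getD (target - v) 0 > 0) ↔ (target - v) ∈ xs := by
      rw [hrem (target - v)]
      constructor
      · intro hp
        exact List.count_pos_iff.mp (by exact_mod_cast hp)
      · intro hm
        exact_mod_cast List.count_pos_iff.mpr hm
    by_cases hc : (target - v) ∈ xs
    · simp only [if_pos (hcond.mpr hc)]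
      by_cases hv : st.2.contains (if v ≤ target - v then [v, target - v] else [target - v, v])
      · simp only [hv, if_true]
        rw [ih _ st hrem]
        rw [PySem.Set.contains_iff] at hv
        simp [pvSpecFold, pvStep, pvPush, hc, hv]
      · simp only [hv, if_false, Bool.false_eq_true]
        rw [ih _ (st.1 ++ [if v ≤ target - v then [v, target - v] else [target - v, v]],
              PySem.Set.add st.2 (if v ≤ target - v then [v, target - v] else [target - v, v])) hrem]
        rw [PySem.Set.contains_iff] at hv
        simp [pvSpecFold, pvStep, pvPush, hc, hv]
    · have : ¬ ((d.insert v (d.getD v 0 - 1)).getD (target - v) 0 > 0) := fun hp => hc (hcond.mp hp)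
      simp only [if_neg this]
      rw [ih _ st hrem]
      simp [pvSpecFold, pvStep, hc]

-- ===== VERDICT (by name: the statement is the Claim_ definition above) =====
theorem find_target_pairs_spec : Claim_equal_find_target_pairs := by
  intro numbers target _
  unfold Spec_find_target_pairs find_target_pairs find_target_pairs_alt
  have hA := pvOuterA target numbers [] ([], PySem.Set.empty)
  simp only [List.nil_append, List.length_nil, Int.natCast_zero] at hA
  have hB := pvMainB target numbers
      (numbers.foldl (fun (d : PySem.Dict Int Int) v => d.insert v (d.getD v 0 + 1)) PySem.Dict.empty)
      ([], PySem.Set.empty)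
      (by
        intro x
        rw [PySem.Dict.foldl_insert_getD_add_one_eq_counter, PySem.Dict.getD_counter])
  simp only [PySem.List.len_eq] at hA ⊢
  rw [hA, ← hB]
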